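-- pv_equiv track=rewrite | github.com/DizzyRaven/PythonDemo | Projects/two_teams/two_teams(Stepan).py | two_teams
-- ===== SOURCE A (Python) =====
-- def two_teams(sailors):
--     list_1 = [[], []]
--     for i in sailors.keys():
--         if sailors[i] > 40 or sailors[i] < 20:
--             list_1[0].append(i)
--         else:
--             list_1[1].append(i)
--     for i in list_1:
--         i.sort()
--     return list_1
-- ===== SOURCE B (Python) =====
-- def two_teams(sailors):
--     result = [[], []]
--     for name, age in sailors.items():
--         team = result[0] if age > 40 or age < 20 else result[1]
--         lo, hi = 0, len(team)
--         while lo < hi: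
--             mid = (lo + hi) // 2
--             if team[mid] < name:
--                 lo = mid + 1
--             else:
--                 hi = mid
--         team.insert(lo, name)
--     return result
-- ===== Notes on version B (the rewrite author's own statement) =====
-- stated objective: alternative
-- what changed: A partitions the keys into two lists and then sorts each list with .sort(); B makes one pass over the dict items and binary-searches each name's ordered position in its team, inserting it there, so the teams are kept sorted online and no sort call exists.
import Mathlib
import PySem

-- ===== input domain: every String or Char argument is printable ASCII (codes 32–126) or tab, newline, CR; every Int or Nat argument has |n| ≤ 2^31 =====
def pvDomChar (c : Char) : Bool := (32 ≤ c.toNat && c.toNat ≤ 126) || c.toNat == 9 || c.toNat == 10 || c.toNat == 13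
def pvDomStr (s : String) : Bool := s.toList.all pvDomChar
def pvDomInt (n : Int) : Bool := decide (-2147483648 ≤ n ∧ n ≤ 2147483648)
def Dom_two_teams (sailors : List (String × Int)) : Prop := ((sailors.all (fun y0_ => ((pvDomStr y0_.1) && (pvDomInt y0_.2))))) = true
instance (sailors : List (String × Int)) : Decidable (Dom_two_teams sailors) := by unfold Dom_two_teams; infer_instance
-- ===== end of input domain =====

-- B replaces A's partition-then-sort-each-group with a single pass over the dict items that
-- binary-searches each name's ordered position in its team and inserts it there, so no sort
-- step exists; objective: alternative.

-- ===== PORT A =====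
def two_teams (sailors : List (String × Int)) : List (List String) :=
  let d : PySem.Dict String Int := PySem.Dict.mk sailors
  -- list_1 = [[], []]; for i in sailors.keys(): append i to list_1[0] or list_1[1]
  let list_1 :=
    (PySem.Set.ofList (sailors.map (·.1))).foldl
      (fun (acc : List String × List String) i =>
        if d.getD i 0 > 40 ∨ d.getD i 0 < 20 then (acc.1 ++ [i], acc.2)
        else (acc.1, acc.2 ++ [i]))
      ([], [])
  -- for i in list_1: i.sort()
  [PySem.List.sorted list_1.1 (fun x => x) false,
   PySem.List.sorted list_1.2 (fun x => x) false]

-- ===== PORT B =====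
-- Source B's 'while lo < hi' binary-search loop; team[mid] is always in range when called
-- with hi ≤ team.length, so getD with a dummy default is exact there
def pvFindPos (team : List String) (name : String) (lo hi : Nat) : Nat :=
  if h : lo < hi then
    let mid := (lo + hi) / 2
    if team.getD mid "" < name then pvFindPos team name (mid + 1) hi
    else pvFindPos team name lo mid
  else lo
termination_by hi - lo
decreasing_by all_goals omega

-- the loop body of Source B: find the ordered position, then team.insert(lo, name)
def pvInsSorted (name : String) (team : List String) : List String :=
  PySem.List.insert team ((pvFindPos team name 0 team.length : Nat) : Int) name

def two_teams_alt (sailors : List (String × Int)) : List (List String) :=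
  let d : PySem.Dict String Int := PySem.Dict.mk sailors
  let result := d.items.foldl
    (fun (acc : List String × List String) kv =>
      if kv.2 > 40 ∨ kv.2 < 20 then (pvInsSorted kv.1 acc.1, acc.2)
      else (acc.1, pvInsSorted kv.1 acc.2))
    ([], [])
  [result.1, result.2]

-- ===== PRECONDITION & SPEC =====
-- A's argument is a Python dict, whose keys are necessarily distinct; an association list with
-- duplicate keys encodes no dict input, so Pre_ requires the keys to be pairwise distinct.
def Pre_two_teams (sailors : List (String × Int)) : Prop := (sailors.map (·.1)).Nodup
instance (sailors : List (String × Int)) : Decidable (Pre_two_teams sailors) := by unfold Pre_two_teams; infer_instance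

def pvWitness_two_teams : (List (String × Int)) := [("bob", 50), ("al", 30), ("cy", 10)]

def Spec_two_teams (sailors : List (String × Int)) (out : List (List String)) : Prop := out = two_teams_alt sailors
instance (sailors : List (String × Int)) (out : List (List String)) : Decidable (Spec_two_teams sailors out) := by unfold Spec_two_teams; infer_instance

-- ===== CLAIM (what is proved, stated in full; the proofs are below) =====
def Claim_equal_two_teams : Prop := ∀ (sailors : List (String × Int)), Dom_two_teams sailors → Pre_two_teams sailors → Spec_two_teams sailors (two_teams sailors)

-- ===== LEMMAS AND PROOFS =====

-- proof-side model of one binary-search insertion: place x before the first element not < x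
def pvInsOrd (x : String) : List String → List String
  | [] => [x]
  | y :: ys => if y < x then y :: pvInsOrd x ys else x :: y :: ys

theorem mem_pvInsOrd (x z : String) (l : List String) :
    z ∈ pvInsOrd x l ↔ z = x ∨ z ∈ l := by
  induction l with
  | nil => simp [pvInsOrd]
  | cons y ys ih =>
    by_cases h : y < x
    · simp only [pvInsOrd, if_pos h, List.mem_cons, ih]
      tauto
    · simp only [pvInsOrd, if_neg h, List.mem_cons]

theorem perm_pvInsOrd (x : String) (l : List String) :
    (pvInsOrd x l).Perm (x :: l) := by
  induction l with
  | nil => simp [pvInsOrd]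
  | cons y ys ih =>
    by_cases h : y < x
    · simpa [pvInsOrd, h] using ((ih.cons y).trans (List.Perm.swap x y ys))
    · simp [pvInsOrd, h]

theorem pairwise_pvInsOrd (x : String) (l : List String)
    (h : l.Pairwise (· ≤ ·)) : (pvInsOrd x l).Pairwise (· ≤ ·) := by
  induction l with
  | nil => exact List.pairwise_singleton _ _
  | cons y ys ih =>
    rcases List.pairwise_cons.mp h with ⟨hy, hys⟩
    by_cases hlt : y < x
    · have he : pvInsOrd x (y :: ys) = y :: pvInsOrd x ys := by rw [pvInsOrd, if_pos hlt]
      rw [he]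
      refine List.pairwise_cons.mpr ⟨?_, ih hys⟩
      intro z hz
      rcases (mem_pvInsOrd x z ys).mp hz with rfl | hz
      · exact le_of_lt hlt
      · exact hy z hz
    · have he : pvInsOrd x (y :: ys) = x :: y :: ys := by rw [pvInsOrd, if_neg hlt]
      rw [he]
      refine List.pairwise_cons.mpr ⟨?_, h⟩
      intro z hz
      have hx : x ≤ y := le_of_not_gt hlt
      rcases List.mem_cons.mp hz with rfl | hz
      · exact hx
      · exact le_trans hx (hy z hz)

-- pvInsOrd splits the list at the takeWhile boundary
theorem pvInsOrd_eq_takeWhile (x : String) (l : List String) :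
    pvInsOrd x l = l.takeWhile (fun y => decide (y < x)) ++ x :: l.dropWhile (fun y => decide (y < x)) := by
  induction l with
  | nil => simp [pvInsOrd]
  | cons y ys ih =>
    by_cases h : y < x
    · rw [pvInsOrd, if_pos h, List.takeWhile_cons_of_pos (by simpa using h),
        List.dropWhile_cons_of_pos (by simpa using h), ih]
      rfl
    · rw [pvInsOrd, if_neg h, List.takeWhile_cons_of_neg (by simpa using h),
        List.dropWhile_cons_of_neg (by simpa using h)]
      rfl

-- the takeWhile boundary is the first index whose element is not < x
theorem takeWhile_length_eq_findIdx (x : String) (l : List String) :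
    (l.takeWhile (fun y => decide (y < x))).length = l.findIdx (fun y => !decide (y < x)) := by
  rw [List.takeWhile_eq_take_findIdx_not, List.length_take]
  exact Nat.min_eq_left List.findIdx_le_length

-- elements strictly inside the takeWhile prefix satisfy the predicate …
theorem takeWhile_boundary_lt (x : String) (l : List String) (i : Nat) (h : i < l.length)
    (hik : i < (l.takeWhile (fun y => decide (y < x))).length) : l[i] < x := by
  rw [takeWhile_length_eq_findIdx] at hik
  have := List.not_of_lt_findIdx hik
  simpa using this

-- … and, on a sorted list, everything at or beyond the boundary does not
theorem takeWhile_boundary_ge (x : String) (l : List String) (hs : l.Pairwise (· ≤ ·))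
    (i : Nat) (h : i < l.length)
    (hik : (l.takeWhile (fun y => decide (y < x))).length ≤ i) : ¬ l[i] < x := by
  set k := (l.takeWhile (fun y => decide (y < x))).length with hk
  have hklen : k < l.length := lt_of_le_of_lt hik h
  have hknot : ¬ l[k] < x := by
    have hkf : l.findIdx (fun y => !decide (y < x)) < l.length := by
      rw [← takeWhile_length_eq_findIdx]; exact hklen
    have := List.findIdx_getElem (w := hkf)
    have hke : k = l.findIdx (fun y => !decide (y < x)) := hk.trans (takeWhile_length_eq_findIdx x l)
    have hge : l[k]'hklen = l[l.findIdx (fun y => !decide (y < x))]'hkf := by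
      congr 1
    rw [hge]
    simpa using this
  rcases eq_or_lt_of_le hik with rfl | hlt
  · exact hknot
  · have hle : l[k] ≤ l[i] := List.pairwise_iff_getElem.mp hs k i hklen h hlt
    intro hcon
    exact hknot (lt_of_le_of_lt hle hcon)

-- the binary search lands exactly on the takeWhile boundary (sorted list)
theorem pvFindPos_eq (l : List String) (x : String) (hs : l.Pairwise (· ≤ ·)) :
    ∀ lo hi, hi ≤ l.length →
      lo ≤ (l.takeWhile (fun y => decide (y < x))).length →
      (l.takeWhile (fun y => decide (y < x))).length ≤ hi →
      pvFindPos l x lo hi = (l.takeWhile (fun y => decide (y < x))).length := by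
  intro lo hi
  induction lo, hi using pvFindPos.induct l x with
  | case1 lo hi h mid hmid ih =>
    intro hhi hlok hkhi
    have hmlt : mid < l.length := by omega
    have hmidk : mid < (l.takeWhile (fun y => decide (y < x))).length := by
      by_contra hcon
      exact (takeWhile_boundary_ge x l hs mid hmlt (by omega)) (by
        have := hmid
        rw [List.getD_eq_getElem?_getD, List.getElem?_eq_getElem hmlt] at this
        simpa using this)
    rw [pvFindPos, dif_pos h, if_pos hmid]
    exact ih hhi (by omega) hkhi
  | case2 lo hi h mid hmid ih =>
    intro hhi hlok hkhi
    have hmlt : mid < l.length := by omega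
    have hkmid : (l.takeWhile (fun y => decide (y < x))).length ≤ mid := by
      by_contra hcon
      exact hmid (by
        have := takeWhile_boundary_lt x l mid hmlt (by omega)
        rw [List.getD_eq_getElem?_getD, List.getElem?_eq_getElem hmlt]
        simpa using this)
    rw [pvFindPos, dif_pos h, if_neg hmid]
    exact ih (by omega) hlok hkmid
  | case3 lo hi h =>
    intro hhi hlok hkhi
    rw [pvFindPos, dif_neg h]
    omega

-- hence one Source B loop iteration = pvInsOrd, on a sorted team
theorem pvInsSorted_eq_pvInsOrd (x : String) (l : List String) (hs : l.Pairwise (· ≤ ·)) :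
    pvInsSorted x l = pvInsOrd x l := by
  set k := (l.takeWhile (fun y => decide (y < x))).length with hk
  have hklen : k ≤ l.length := by
    rw [hk, takeWhile_length_eq_findIdx]
    exact List.findIdx_le_length
  have hfind : pvFindPos l x 0 l.length = k :=
    pvFindPos_eq l x hs 0 l.length le_rfl (by omega) hklen
  have htake : l.takeWhile (fun y => decide (y < x)) = l.take k :=
    List.prefix_iff_eq_take.mp (List.takeWhile_prefix _)
  have hdrop : l.dropWhile (fun y => decide (y < x)) = l.drop k := by
    have h1 : l.takeWhile (fun y => decide (y < x)) ++ l.dropWhile (fun y => decide (y < x)) = l :=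
      List.takeWhile_append_dropWhile
    have h2 : l.take k ++ l.drop k = l := List.take_append_drop k l
    rw [htake] at h1
    exact List.append_cancel_left (h1.trans h2.symm)
  rw [pvInsSorted, hfind, PySem.List.insert_natCast l k x hklen,
    pvInsOrd_eq_takeWhile, htake, hdrop]

theorem foldl_pvInsOrd_perm (ks a : List String) :
    (ks.foldl (fun acc k => pvInsOrd k acc) a).Perm (a ++ ks) := by
  induction ks generalizing a with
  | nil => simp
  | cons k t ih =>
    refine (ih (pvInsOrd k a)).trans ?_
    refine ((perm_pvInsOrd k a).append_right t).trans ?_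
    exact List.perm_middle.symm

theorem foldl_pvInsOrd_pairwise (ks a : List String)
    (h : a.Pairwise (· ≤ ·)) :
    (ks.foldl (fun acc k => pvInsOrd k acc) a).Pairwise (· ≤ ·) := by
  induction ks generalizing a with
  | nil => simpa using h
  | cons k t ih => exact ih _ (pairwise_pvInsOrd k a h)

-- the Source B insertion loop = the pvInsOrd insertion loop (accumulator stays sorted)
theorem foldl_pvInsSorted_eq (ks a : List String) (h : a.Pairwise (· ≤ ·)) :
    ks.foldl (fun acc k => pvInsSorted k acc) a = ks.foldl (fun acc k => pvInsOrd k acc) a := by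
  induction ks generalizing a with
  | nil => rfl
  | cons k t ih =>
    simp only [List.foldl_cons, pvInsSorted_eq_pvInsOrd k a h]
    exact ih _ (pairwise_pvInsOrd k a h)

-- online ordered insertion from [] IS sorted(ks)
theorem foldl_pvInsOrd_eq_sorted (ks : List String) :
    ks.foldl (fun acc k => pvInsOrd k acc) [] = PySem.List.sorted ks (fun x => x) false := by
  have h1 : (ks.foldl (fun acc k => pvInsOrd k acc) []).Perm ks := by
    simpa using foldl_pvInsOrd_perm ks []
  have h2 := foldl_pvInsOrd_pairwise ks [] List.Pairwise.nil
  exact (PySem.List.sorted_id_eq_of_perm_of_pairwise ks _ h1 h2).symm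

theorem foldl_pvInsSorted_eq_sorted (ks : List String) :
    ks.foldl (fun acc k => pvInsSorted k acc) [] = PySem.List.sorted ks (fun x => x) false := by
  rw [foldl_pvInsSorted_eq ks [] List.Pairwise.nil, foldl_pvInsOrd_eq_sorted]

-- A's single partition loop, split into the two filters
theorem partition_foldl (ks : List String) (p : String → Prop) [DecidablePred p]
    (a b : List String) :
    ks.foldl (fun (acc : List String × List String) i =>
        if p i then (acc.1 ++ [i], acc.2) else (acc.1, acc.2 ++ [i])) (a, b)
      = (a ++ ks.filter (fun i => decide (p i)), b ++ ks.filter (fun i => !decide (p i))) := by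
  induction ks generalizing a b with
  | nil => simp
  | cons x t ih =>
    by_cases hx : p x <;> simp [List.foldl_cons, hx, ih]

-- B's single insertion loop, split into insertion loops over the two filtered key lists
theorem insert_foldl_split (l : List (String × Int)) (p : String × Int → Prop) [DecidablePred p]
    (a b : List String) :
    l.foldl (fun (acc : List String × List String) kv =>
        if p kv then (pvInsSorted kv.1 acc.1, acc.2) else (acc.1, pvInsSorted kv.1 acc.2)) (a, b)
      = (((l.filter (fun kv => decide (p kv))).map (·.1)).foldl (fun acc k => pvInsSorted k acc) a,
         ((l.filter (fun kv => !decide (p kv))).map (·.1)).foldl (fun acc k => pvInsSorted k acc) b) := by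
  induction l generalizing a b with
  | nil => simp
  | cons kv t ih =>
    by_cases h : p kv <;> simp [List.foldl_cons, h, ih]

theorem two_teams_eq (sailors : List (String × Int)) (hnd : (sailors.map (·.1)).Nodup) :
    two_teams sailors = two_teams_alt sailors := by
  unfold two_teams two_teams_alt
  have hget : ∀ kv ∈ sailors, (PySem.Dict.mk sailors).getD kv.1 0 = kv.2 := by
    intro kv hkv
    exact PySem.Dict.getD_of_mem_items (PySem.Dict.mk sailors)
      (by simpa using hkv) hnd 0
  -- B's value test, rewritten through the dict lookup
  have hfilt : ∀ (q : Int → Bool),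
      (sailors.filter (fun kv => q kv.2)).map (·.1)
        = (sailors.map (·.1)).filter (fun k => q ((PySem.Dict.mk sailors).getD k 0)) := by
    intro q
    rw [List.filter_map]
    have : sailors.filter ((fun k => q ((PySem.Dict.mk sailors).getD k 0)) ∘ (·.1))
        = sailors.filter (fun kv => q kv.2) := by
      apply List.filter_congr
      intro kv hkv
      simp [Function.comp, hget kv hkv]
    rw [this]
  simp only [partition_foldl, insert_foldl_split,
    PySem.Set.ofList_eq_self_of_nodup _ hnd, List.nil_append]
  have e1 := hfilt (fun v => decide (v > 40 ∨ v < 20))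
  have e2 := hfilt (fun v => !decide (v > 40 ∨ v < 20))
  simp only [e1, e2, ← foldl_pvInsSorted_eq_sorted]

-- ===== VERDICT (by name: the statement is the Claim_ definition above) =====
theorem two_teams_spec : Claim_equal_two_teams := fun sailors _ hpre => two_teams_eq sailors hpre
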